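-- pv_equiv track=rewrite | github.com/Joul24py/UAA-ICI | 28-S8-G-ClassExercises/02-exercise02/code/functions2d.py | calcVertexes
-- ===== SOURCE A (Python) =====
-- def calcVertexes(image):
--     vertexes = 0
--     for i in range(len(image)):
--         for j in range(len(image[i])):
--             if image[i][j] == 1:
--                 vertexes = vertexes + 4
--                 if (i > 0) and (j > 0):
--                     if (image[i - 1][j - 1] == 1) or (image[i - 1][j] == 1) or (image[i][j - 1] == 1):
--                         vertexes = vertexes - 1
--                 if (i > 0) and ((j + 1) < len(image[i])):
--                     if (image[i - 1][j + 1] == 1) or (image[i - 1][j] == 1) or (image[i][j + 1] == 1):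
--                         vertexes = vertexes - 1
--                 if ((i + 1) < len(image)) and (j > 0):
--                     if (image[i + 1][j - 1] == 1) or (image[i + 1][j] == 1) or (image[i][j - 1] == 1):
--                         vertexes = vertexes - 1
--                 if ((i + 1) < len(image)) and ((j + 1) < len(image[i])):
--                     if (image[i + 1][j + 1] == 1) or (image[i + 1][j] == 1) or (image[i][j + 1] == 1):
--                         vertexes = vertexes - 1
--     return vertexes
-- ===== SOURCE B (Python) =====
-- def calcVertexes(image):
--     h = len(image)
--     w = max((len(row) for row in image), default=0)
--     def filled(i, j):
--         return 0 <= j < len(image[i]) and image[i][j] == 1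
--     total = 4 * sum(row.count(1) for row in image)
--     for i in range(1, h):
--         for j in range(1, w):
--             k = filled(i - 1, j - 1) + filled(i - 1, j) + filled(i, j - 1) + filled(i, j)
--             if k >= 2:
--                 total -= k
--     return total
-- ===== Notes on version B (the rewrite author's own statement) =====
-- stated objective: alternative
-- what changed: B replaces A's per-cell add-4-then-subtract scheme (four guarded three-neighbour tests inside the cell scan) by the closed form 4*count(filled cells) minus one pass over the interior corner lattice that subtracts, at each corner where at least two filled cells meet (cells outside a row treated as empty), the number of filled cells meeting there.
-- intended difference: On ragged images where a filled cell ends a row shorter than the widest row and at least two filled cells meet at that cell's right-hand corner, A's diagonal guard (bounded by the cell's own row length) skips the corner-sharing subtraction and returns a larger count (7 on [[0,1],[1]]), while B treats positions outside a row as empty and subtracts (6), which is the intended vertex count since a shared corner is not a vertex. — e.g. on calcVertexes([[0, 1], [1]]): A returns 7, B returns 6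
import Mathlib
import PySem

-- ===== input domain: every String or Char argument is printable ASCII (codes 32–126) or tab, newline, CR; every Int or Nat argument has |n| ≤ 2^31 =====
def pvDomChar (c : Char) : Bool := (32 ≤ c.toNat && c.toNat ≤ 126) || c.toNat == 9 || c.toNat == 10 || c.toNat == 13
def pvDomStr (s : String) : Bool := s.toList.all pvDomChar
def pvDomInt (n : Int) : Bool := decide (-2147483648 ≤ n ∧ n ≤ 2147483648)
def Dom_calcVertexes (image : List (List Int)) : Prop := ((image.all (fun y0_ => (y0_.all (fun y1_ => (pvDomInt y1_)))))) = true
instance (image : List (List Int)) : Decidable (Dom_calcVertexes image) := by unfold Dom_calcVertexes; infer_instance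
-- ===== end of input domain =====

-- B counts vertices as the closed form 4*filled minus one pass over the interior corner
-- lattice (subtracting, at each corner where at least two filled cells meet, the number of
-- filled cells meeting there, with cells outside a row treated as empty); A instead does a
-- per-cell add-4-then-subtract with four guarded neighbour tests.  Same cost, different
-- traversal; on ragged rows they differ on the D_ corners stated below.

-- shared indexing helper: image[i][j] in total form (0 off the grid; every read either
-- port performs on inputs admitted by Pre_ is in range or explicitly bounds-checked)
def pvAt (image : List (List Int)) (i j : Int) : Int :=
  PySem.List.pyGetD (PySem.List.pyGetD image i ([] : List Int)) j 0
-- ===== PORT A =====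
-- the body of A's inner loop, named so the proofs can speak about it
def pvCellA (image : List (List Int)) (i : Int) (v j : Int) : Int :=
  if pvAt image i j = 1 then
    let v := v + 4
    let v := if 0 < i ∧ 0 < j then
        (if pvAt image (i-1) (j-1) = 1 ∨ pvAt image (i-1) j = 1 ∨ pvAt image i (j-1) = 1
         then v - 1 else v) else v
    let v := if 0 < i ∧ j + 1 < PySem.List.len (PySem.List.pyGetD image i ([] : List Int)) then
        (if pvAt image (i-1) (j+1) = 1 ∨ pvAt image (i-1) j = 1 ∨ pvAt image i (j+1) = 1
         then v - 1 else v) else v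
    let v := if i + 1 < PySem.List.len image ∧ 0 < j then
        (if pvAt image (i+1) (j-1) = 1 ∨ pvAt image (i+1) j = 1 ∨ pvAt image i (j-1) = 1
         then v - 1 else v) else v
    let v := if i + 1 < PySem.List.len image ∧ j + 1 < PySem.List.len (PySem.List.pyGetD image i ([] : List Int)) then
        (if pvAt image (i+1) (j+1) = 1 ∨ pvAt image (i+1) j = 1 ∨ pvAt image i (j+1) = 1
         then v - 1 else v) else v
    v
  else v

def calcVertexes (image : List (List Int)) : Int :=
  (PySem.List.pyRange 0 (PySem.List.len image) 1).foldl (fun vertexes i =>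
    (PySem.List.pyRange 0 (PySem.List.len (PySem.List.pyGetD image i ([] : List Int))) 1).foldl
      (pvCellA image i) vertexes) 0

-- ===== PORT B =====
-- Source B's helper filled(i, j): 0 <= j < len(image[i]) and image[i][j] == 1
def pvIsFilled (image : List (List Int)) (i j : Int) : Bool :=
  decide (0 ≤ j) && decide (j < PySem.List.len (PySem.List.pyGetD image i ([] : List Int)))
    && (pvAt image i j == 1)

-- the body of B's corner loop, named so the proofs can speak about it
def pvCornerB (image : List (List Int)) (i : Int) (total j : Int) : Int :=
  let k : Int := (if pvIsFilled image (i-1) (j-1) then 1 else 0)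
               + (if pvIsFilled image (i-1) j then 1 else 0)
               + (if pvIsFilled image i (j-1) then 1 else 0)
               + (if pvIsFilled image i j then 1 else 0)
  if 2 ≤ k then total - k else total

def calcVertexes_alt (image : List (List Int)) : Int :=
  let h := PySem.List.len image
  let w : Int := (PySem.List.max? (image.map (fun row => PySem.List.len row)) id).getD 0
  let total : Int := 4 * image.foldl (fun acc row => acc + ((PySem.List.count row 1 : Nat) : Int)) 0
  (PySem.List.pyRange 1 h 1).foldl (fun total i =>
    (PySem.List.pyRange 1 w 1).foldl (pvCornerB image i) total) total

-- ===== PRECONDITION & SPEC =====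
-- Pre_ holds exactly when A raises no IndexError: every neighbour read that a filled cell's
-- guarded checks perform (accounting for Python's short-circuit `or`) stays inside the
-- adjacent row.  pvOkB is the per-cell condition (an implication a → b is written !a || b).
def pvOkB (image : List (List Int)) (i j : Nat) : Bool :=
  (!(decide (0 < i) && decide (0 < j)) ||
     (decide (j - 1 < (image.getD (i-1) []).length) &&
      (decide ((image.getD (i-1) []).getD (j-1) 0 = 1) || decide (j < (image.getD (i-1) []).length)))) &&
  (!(decide (0 < i) && decide (j + 1 < (image.getD i []).length)) ||
     decide (j + 1 < (image.getD (i-1) []).length)) &&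
  (!(decide (i + 1 < image.length) && decide (0 < j)) ||
     (decide (j - 1 < (image.getD (i+1) []).length) &&
      (decide ((image.getD (i+1) []).getD (j-1) 0 = 1) || decide (j < (image.getD (i+1) []).length)))) &&
  (!(decide (i + 1 < image.length) && decide (j + 1 < (image.getD i []).length)) ||
     decide (j + 1 < (image.getD (i+1) []).length))

def Pre_calcVertexes (image : List (List Int)) : Prop :=
  ∀ i < image.length, ∀ j < (image.getD i []).length,
    (image.getD i []).getD j 0 = 1 → pvOkB image i j = true
instance (image : List (List Int)) : Decidable (Pre_calcVertexes image) := by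
  unfold Pre_calcVertexes; infer_instance

def pvWitness_calcVertexes : List (List Int) := [[1, 0], [0, 1]]

-- row r of the image ([] when r is out of range)
abbrev pvRow (image : List (List Int)) (r : Nat) : List Int := image.getD r []
-- cell (r, c) exists and is filled
abbrev pvF (image : List (List Int)) (r c : Nat) : Prop :=
  c < (pvRow image r).length ∧ (pvRow image r).getD c 0 = 1

-- On ragged images where a filled cell ends a row shorter than some other row and another
-- filled cell in an adjacent row touches its right-hand corner, A's diagonal guard (bounded
-- by the cell's own row length) skips the corner-sharing subtraction and returns a larger
-- count, while B treats positions outside a row as empty and subtracts; B's count is the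
-- intended one (a shared corner is not a vertex of the shape).
def D_calcVertexes (image : List (List Int)) : Prop :=
  ∃ r < image.length, ∃ o < image.length, (o = r + 1 ∨ r = o + 1) ∧
    pvF image r ((pvRow image r).length - 1) ∧
    (∃ m < image.length, (pvRow image r).length < (pvRow image m).length) ∧
    (pvF image o ((pvRow image r).length - 1) ∨ pvF image o ((pvRow image r).length))
instance (image : List (List Int)) : Decidable (D_calcVertexes image) := by
  unfold D_calcVertexes; infer_instance

def Spec_calcVertexes (image : List (List Int)) (out : Int) : Prop :=
  ¬ D_calcVertexes image → out = calcVertexes_alt image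
instance (image : List (List Int)) (out : Int) : Decidable (Spec_calcVertexes image out) := by
  unfold Spec_calcVertexes; infer_instance

def pvDiffWitness_calcVertexes : List (List Int) := [[0, 1], [1]]
def pvDiffWitnessOut_calcVertexes : Int × Int := (7, 6)

-- ===== CLAIM (what is proved, stated in full; the proofs are below) =====
def Claim_unchanged_calcVertexes : Prop := ∀ (image : List (List Int)), Dom_calcVertexes image → Pre_calcVertexes image → Spec_calcVertexes image (calcVertexes image)
def Claim_changed_calcVertexes : Prop := Dom_calcVertexes (pvDiffWitness_calcVertexes) ∧ Pre_calcVertexes (pvDiffWitness_calcVertexes) ∧ D_calcVertexes (pvDiffWitness_calcVertexes) ∧ calcVertexes (pvDiffWitness_calcVertexes) = pvDiffWitnessOut_calcVertexes.1 ∧ calcVertexes_alt (pvDiffWitness_calcVertexes) = pvDiffWitnessOut_calcVertexes.2 ∧ pvDiffWitnessOut_calcVertexes.1 ≠ pvDiffWitnessOut_calcVertexes.2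
def Claim_exact_calcVertexes : Prop := ∀ (image : List (List Int)), Dom_calcVertexes image → Pre_calcVertexes image → D_calcVertexes image → calcVertexes image ≠ calcVertexes_alt image

-- ===== LEMMAS AND PROOFS =====

def pvW (image : List (List Int)) : Nat := (image.map List.length).foldl max 0

def pvInd (image : List (List Int)) (i j : Int) : Int := if pvAt image i j = 1 then 1 else 0
def pvCnt (image : List (List Int)) (r c : Nat) : Nat :=
  if c < (image.getD r []).length ∧ (image.getD r []).getD c 0 = 1 then 1 else 0
def pvLenI (image : List (List Int)) (i : Int) : Int :=
  ((PySem.List.pyGetD image i ([] : List Int)).length : Int)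

lemma foldl_max_init_le (l : List Nat) (a : Nat) : a ≤ l.foldl max a := by
  induction l generalizing a with
  | nil => simp
  | cons x t ih => exact le_trans (le_max_left a x) (ih (max a x))

lemma foldl_max_mem_le (l : List Nat) (a x : Nat) (hx : x ∈ l) : x ≤ l.foldl max a := by
  induction l generalizing a with
  | nil => simp at hx
  | cons y t ih =>
    rcases List.mem_cons.mp hx with h | h
    · subst h
      exact le_trans (le_max_right a x) (foldl_max_init_le t (max a x))
    · exact ih (max a y) h

lemma pvW_ge (image : List (List Int)) (i : Nat) : (image.getD i []).length ≤ pvW image := by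
  by_cases hlt : i < image.length
  · exact foldl_max_mem_le _ 0 _ (List.mem_map.mpr ⟨image.getD i [], by
      rw [List.getD_eq_getElem _ _ hlt]; exact ⟨List.getElem_mem hlt, rfl⟩⟩)
  · rw [List.getD_eq_default _ _ (by omega)]
    simp

lemma pvAt_big (image : List (List Int)) (i j : Int) (_hj : 0 ≤ j)
    (hlen : pvLenI image i ≤ j) : pvAt image i j = 0 := by
  unfold pvAt
  unfold pvLenI at hlen
  rw [PySem.List.pyGetD_of_none]
  rw [PySem.List.pyGet?_eq_none_iff]
  intro h
  rcases h with ⟨h1, h2⟩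
  omega

lemma pvIndGuard (image : List (List Int)) (r s : Int) (hs : 0 ≤ s) :
    (if s < pvLenI image r ∧ pvAt image r s = 1 then (1:Int) else 0) = pvInd image r s := by
  by_cases h : pvAt image r s = 1
  · have hlt : s < pvLenI image r := by
      by_contra hge
      rw [pvAt_big image r s hs (by omega)] at h
      norm_num at h
    simp [pvInd, h, hlt]
  · simp [pvInd, h]

lemma sumExtend (L W : Nat) (hLW : L ≤ W) (F : Nat → Int) (hF : ∀ j, L ≤ j → F j = 0) :
    ∑ j ∈ Finset.range L, F j = ∑ j ∈ Finset.range W, F j := by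
  apply Finset.sum_subset (by exact Finset.range_subset_range.mpr hLW)
  intro j hj hnj
  simp only [Finset.mem_range] at hj hnj
  exact hF j (by omega)

lemma truncKeep (W : Nat) (L : Int) (hL : L ≤ (W:Int)) (F : Nat → Int) :
    ∑ j ∈ Finset.range W, (if (j:Int)+1 < L then F j else 0)
      = ∑ j ∈ Finset.range (W-1), (if (j:Int)+1 < L then F j else 0) := by
  cases W with
  | zero => rfl
  | succ m =>
    rw [Finset.sum_range_succ]
    have : ¬ ((m:Int)+1 < L) := by push_cast at hL ⊢; omega
    simp [this]

lemma corner2 (a b c d : Int) (gA gC : Prop) [Decidable gA] [Decidable gC] :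
    (if d=1 then (1:Int) else 0)*(if a=1∨b=1∨c=1 then 1 else 0)
  + (if gC then (if c=1 then (1:Int) else 0)*(if b=1∨a=1∨d=1 then 1 else 0) else 0)
  + (if b=1 then (1:Int) else 0)*(if c=1∨d=1∨a=1 then 1 else 0)
  + (if gA then (if a=1 then (1:Int) else 0)*(if d=1∨c=1∨b=1 then 1 else 0) else 0)
  = (if 2 ≤ (if a=1 then (1:Int) else 0)+(if b=1 then (1:Int) else 0)+(if c=1 then (1:Int) else 0)+(if d=1 then (1:Int) else 0) then
      ((if gA then (if a=1 then (1:Int) else 0) else 0) + (if b=1 then (1:Int) else 0)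
        + (if gC then (if c=1 then (1:Int) else 0) else 0) + (if d=1 then (1:Int) else 0))
     else 0) := by
  by_cases ha : a = 1 <;> by_cases hb : b = 1 <;> by_cases hc : c = 1 <;> by_cases hd : d = 1 <;>
    simp [ha, hb, hc, hd] <;> split_ifs <;> norm_num

def pvD1 (image : List (List Int)) (i j : Int) : Int :=
  pvInd image i j * (if pvAt image (i-1) (j-1) = 1 ∨ pvAt image (i-1) j = 1 ∨ pvAt image i (j-1) = 1 then 1 else 0)
def pvD2 (image : List (List Int)) (i j : Int) : Int :=
  pvInd image i j * (if pvAt image (i-1) (j+1) = 1 ∨ pvAt image (i-1) j = 1 ∨ pvAt image i (j+1) = 1 then 1 else 0)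
def pvD3 (image : List (List Int)) (i j : Int) : Int :=
  pvInd image i j * (if pvAt image (i+1) (j-1) = 1 ∨ pvAt image (i+1) j = 1 ∨ pvAt image i (j-1) = 1 then 1 else 0)
def pvD4 (image : List (List Int)) (i j : Int) : Int :=
  pvInd image i j * (if pvAt image (i+1) (j+1) = 1 ∨ pvAt image (i+1) j = 1 ∨ pvAt image i (j+1) = 1 then 1 else 0)

def pvSub (image : List (List Int)) (p q : Int) : Int :=
  let a : Int := if q - 1 < pvLenI image (p-1) ∧ pvAt image (p-1) (q-1) = 1 then 1 else 0
  let b : Int := if q < pvLenI image (p-1) ∧ pvAt image (p-1) q = 1 then 1 else 0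
  let c : Int := if q - 1 < pvLenI image p ∧ pvAt image p (q-1) = 1 then 1 else 0
  let d : Int := if q < pvLenI image p ∧ pvAt image p q = 1 then 1 else 0
  if 2 ≤ a + b + c + d then
    (if q < pvLenI image (p-1) then a else 0) + b + (if q < pvLenI image p then c else 0) + d
  else 0

lemma cornerPoint2 (image : List (List Int)) (i j : Int) (_hi : 0 ≤ i) (hj : 0 ≤ j) :
    pvD1 image (i+1) (j+1) + (if j+1 < pvLenI image (i+1) then pvD2 image (i+1) j else 0)
      + pvD3 image i (j+1) + (if j+1 < pvLenI image i then pvD4 image i j else 0)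
      = pvSub image (i+1) (j+1) := by
  simp only [pvSub, add_sub_cancel_right, pvIndGuard image i j hj,
    pvIndGuard image i (j+1) (by omega), pvIndGuard image (i+1) j hj,
    pvIndGuard image (i+1) (j+1) (by omega)]
  simp only [pvD1, pvD2, pvD3, pvD4, pvInd, add_sub_cancel_right]
  exact corner2 (pvAt image i j) (pvAt image i (j+1)) (pvAt image (i+1) j) (pvAt image (i+1) (j+1))
    ((j:Int)+1 < pvLenI image i) ((j:Int)+1 < pvLenI image (i+1))

def pvTermA (image : List (List Int)) (h w i j : Int) : Int :=
  if pvAt image i j = 1 then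
    4 - (if 0 < i ∧ 0 < j then
          (if pvAt image (i-1) (j-1) = 1 ∨ pvAt image (i-1) j = 1 ∨ pvAt image i (j-1) = 1 then 1 else 0) else 0)
      - (if 0 < i ∧ j + 1 < w then
          (if pvAt image (i-1) (j+1) = 1 ∨ pvAt image (i-1) j = 1 ∨ pvAt image i (j+1) = 1 then 1 else 0) else 0)
      - (if i + 1 < h ∧ 0 < j then
          (if pvAt image (i+1) (j-1) = 1 ∨ pvAt image (i+1) j = 1 ∨ pvAt image i (j-1) = 1 then 1 else 0) else 0)
      - (if i + 1 < h ∧ j + 1 < w then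
          (if pvAt image (i+1) (j+1) = 1 ∨ pvAt image (i+1) j = 1 ∨ pvAt image i (j+1) = 1 then 1 else 0) else 0)
  else 0

lemma termA_decomp (image : List (List Int)) (h w i j : Int) :
    pvTermA image h w i j = 4 * pvInd image i j
      - (if 0 < i ∧ 0 < j then pvD1 image i j else 0)
      - (if 0 < i ∧ j+1 < w then pvD2 image i j else 0)
      - (if i+1 < h ∧ 0 < j then pvD3 image i j else 0)
      - (if i+1 < h ∧ j+1 < w then pvD4 image i j else 0) := by
  simp only [pvTermA, pvD1, pvD2, pvD3, pvD4, pvInd]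
  by_cases hf : pvAt image i j = 1
  · simp only [if_pos hf]
    split_ifs <;> ring
  · simp only [if_neg hf]
    split_ifs <;> ring

lemma pvIteSub (v : Int) (c d : Prop) [Decidable c] [Decidable d] :
    (if c then (if d then v - 1 else v) else v) = v - (if c then (if d then (1:Int) else 0) else 0) := by
  split_ifs <;> ring

lemma pvCellA_eq (image : List (List Int)) (i : Int) :
    pvCellA image i = fun v j => v + pvTermA image (image.length : Int) (pvLenI image i) i j := by
  funext v j
  by_cases hf : pvAt image i j = 1
  · simp only [pvCellA, pvTermA, pvLenI, PySem.List.len_eq, if_pos hf, pvIteSub]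
    ring
  · simp [pvCellA, pvTermA, hf]

lemma shiftL (h : Nat) (F : Nat → Int) :
    ∑ i ∈ Finset.range h, (if 0 < (i:Int) then F i else 0) = ∑ i ∈ Finset.range (h-1), F (i+1) := by
  cases h with
  | zero => simp
  | succ m => rw [Finset.sum_range_succ']; simp

lemma truncR (h : Nat) (F : Nat → Int) :
    ∑ i ∈ Finset.range h, (if (i:Int)+1 < (h:Int) then F i else 0) = ∑ i ∈ Finset.range (h-1), F i := by
  cases h with
  | zero => simp
  | succ m =>
    rw [Finset.sum_range_succ]
    have h1 : ∀ i ∈ Finset.range m, (if ((i:Int))+1 < ((m+1:Nat):Int) then F i else 0) = F i := by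
      intro i hi
      rw [if_pos]
      simp only [Finset.mem_range] at hi
      push_cast; omega
    rw [Finset.sum_congr rfl h1]
    simp

lemma shiftLI (h : Nat) (F : Int → Int) :
    ∑ i ∈ Finset.range h, (if 0 < (i:Int) then F i else 0) = ∑ i ∈ Finset.range (h-1), F ((i:Int)+1) := by
  rw [shiftL h (fun k => F k)]
  apply Finset.sum_congr rfl
  intro i _
  congr 1

lemma truncRI (h : Nat) (F : Int → Int) :
    ∑ i ∈ Finset.range h, (if (i:Int)+1 < (h:Int) then F i else 0) = ∑ i ∈ Finset.range (h-1), F i :=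
  truncR h (fun k => F k)

theorem sums_agree2 (image : List (List Int)) (h : Nat) :
    ∑ i ∈ Finset.range h, ∑ j ∈ Finset.range (pvW image), pvTermA image (h:Int) (pvLenI image i) i j =
      4 * (∑ i ∈ Finset.range h, ∑ j ∈ Finset.range (pvW image), pvInd image i j)
      - ∑ i ∈ Finset.range (h - 1), ∑ j ∈ Finset.range (pvW image - 1), pvSub image (i+1) (j+1) := by
  have hW : ∀ p : Nat, pvLenI image (p:Int) ≤ ((pvW image : Nat) : Int) := by
    intro p
    have := pvW_ge image p
    rw [List.getD_eq_getElem?_getD] at this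
    simp only [pvLenI]
    simp [PySem.List.pyGetD_natCast]
    omega
  simp only [termA_decomp]
  simp only [Finset.sum_sub_distrib]
  simp only [← Finset.mul_sum]
  set W := pvW image with hWdef
  have e1 : ∑ x ∈ Finset.range h, ∑ y ∈ Finset.range W, (if 0 < (x:Int) ∧ 0 < (y:Int) then pvD1 image x y else 0)
      = ∑ i ∈ Finset.range (h-1), ∑ j ∈ Finset.range (W-1), pvD1 image ((i:Int)+1) ((j:Int)+1) := by
    have inner : ∀ x : Nat, ∑ y ∈ Finset.range W, (if 0 < (x:Int) ∧ 0 < (y:Int) then pvD1 image x y else 0)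
        = if 0 < (x:Int) then ∑ j ∈ Finset.range (W-1), pvD1 image x ((j:Int)+1) else 0 := by
      intro x; by_cases hx : 0 < (x:Int)
      · simp only [hx, true_and, if_true]
        exact shiftLI W (fun q => pvD1 image x q)
      · simp only [hx, false_and, if_false, Finset.sum_const_zero]
    rw [Finset.sum_congr rfl (fun x _ => inner x)]
    exact shiftLI h (fun p => ∑ j ∈ Finset.range (W-1), pvD1 image p ((j:Int)+1))
  have e2 : ∑ x ∈ Finset.range h, ∑ y ∈ Finset.range W, (if 0 < (x:Int) ∧ (y:Int)+1 < pvLenI image x then pvD2 image x y else 0)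
      = ∑ i ∈ Finset.range (h-1), ∑ j ∈ Finset.range (W-1), (if (j:Int)+1 < pvLenI image ((i:Int)+1) then pvD2 image ((i:Int)+1) (j:Int) else 0) := by
    have inner : ∀ x : Nat, ∑ y ∈ Finset.range W, (if 0 < (x:Int) ∧ (y:Int)+1 < pvLenI image x then pvD2 image x y else 0)
        = if 0 < (x:Int) then ∑ j ∈ Finset.range (W-1), (if (j:Int)+1 < pvLenI image x then pvD2 image x (j:Int) else 0) else 0 := by
      intro x; by_cases hx : 0 < (x:Int)
      · simp only [hx, true_and, if_true]
        exact truncKeep W (pvLenI image x) (hW x) (fun q => pvD2 image x q)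
      · simp only [hx, false_and, if_false, Finset.sum_const_zero]
    rw [Finset.sum_congr rfl (fun x _ => inner x)]
    exact shiftLI h (fun p => ∑ j ∈ Finset.range (W-1), (if (j:Int)+1 < pvLenI image p then pvD2 image p (j:Int) else 0))
  have e3 : ∑ x ∈ Finset.range h, ∑ y ∈ Finset.range W, (if (x:Int)+1 < (h:Int) ∧ 0 < (y:Int) then pvD3 image x y else 0)
      = ∑ i ∈ Finset.range (h-1), ∑ j ∈ Finset.range (W-1), pvD3 image (i:Int) ((j:Int)+1) := by
    have inner : ∀ x : Nat, ∑ y ∈ Finset.range W, (if (x:Int)+1 < (h:Int) ∧ 0 < (y:Int) then pvD3 image x y else 0)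
        = if (x:Int)+1 < (h:Int) then ∑ j ∈ Finset.range (W-1), pvD3 image x ((j:Int)+1) else 0 := by
      intro x; by_cases hx : (x:Int)+1 < (h:Int)
      · simp only [hx, true_and, if_true]
        exact shiftLI W (fun q => pvD3 image x q)
      · simp only [hx, false_and, if_false, Finset.sum_const_zero]
    rw [Finset.sum_congr rfl (fun x _ => inner x)]
    exact truncRI h (fun p => ∑ j ∈ Finset.range (W-1), pvD3 image p ((j:Int)+1))
  have e4 : ∑ x ∈ Finset.range h, ∑ y ∈ Finset.range W, (if (x:Int)+1 < (h:Int) ∧ (y:Int)+1 < pvLenI image x then pvD4 image x y else 0)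
      = ∑ i ∈ Finset.range (h-1), ∑ j ∈ Finset.range (W-1), (if (j:Int)+1 < pvLenI image (i:Int) then pvD4 image (i:Int) (j:Int) else 0) := by
    have inner : ∀ x : Nat, ∑ y ∈ Finset.range W, (if (x:Int)+1 < (h:Int) ∧ (y:Int)+1 < pvLenI image x then pvD4 image x y else 0)
        = if (x:Int)+1 < (h:Int) then ∑ j ∈ Finset.range (W-1), (if (j:Int)+1 < pvLenI image x then pvD4 image x (j:Int) else 0) else 0 := by
      intro x; by_cases hx : (x:Int)+1 < (h:Int)
      · simp only [hx, true_and, if_true]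
        exact truncKeep W (pvLenI image x) (hW x) (fun q => pvD4 image x q)
      · simp only [hx, false_and, if_false, Finset.sum_const_zero]
    rw [Finset.sum_congr rfl (fun x _ => inner x)]
    exact truncRI h (fun p => ∑ j ∈ Finset.range (W-1), (if (j:Int)+1 < pvLenI image p then pvD4 image p (j:Int) else 0))
  rw [e1, e2, e3, e4]
  have hC : (∑ i ∈ Finset.range (h-1), ∑ j ∈ Finset.range (W-1), pvD1 image ((i:Int)+1) ((j:Int)+1))
          + (∑ i ∈ Finset.range (h-1), ∑ j ∈ Finset.range (W-1), (if (j:Int)+1 < pvLenI image ((i:Int)+1) then pvD2 image ((i:Int)+1) (j:Int) else 0))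
          + (∑ i ∈ Finset.range (h-1), ∑ j ∈ Finset.range (W-1), pvD3 image (i:Int) ((j:Int)+1))
          + (∑ i ∈ Finset.range (h-1), ∑ j ∈ Finset.range (W-1), (if (j:Int)+1 < pvLenI image (i:Int) then pvD4 image (i:Int) (j:Int) else 0))
      = ∑ i ∈ Finset.range (h-1), ∑ j ∈ Finset.range (W-1), pvSub image ((i:Int)+1) ((j:Int)+1) := by
    simp only [← Finset.sum_add_distrib]
    apply Finset.sum_congr rfl
    intro i _
    apply Finset.sum_congr rfl
    intro j _
    exact cornerPoint2 image (i:Int) (j:Int) (by positivity) (by positivity)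
  linarith [hC]

lemma pvRangeOneSum (n : Nat) (g : Int → Int) :
    ((PySem.List.pyRange 1 (n:Int) 1).map g).sum = ∑ k ∈ Finset.range (n-1), g (1 + (k:Int)) := by
  rw [PySem.List.pyRange_one]
  have h1 : ((n:Int) - 1).toNat = n - 1 := by omega
  rw [h1, List.map_map]
  rfl

lemma pvRangeZeroSum (n : Nat) (g : Int → Int) :
    ((PySem.List.pyRange 0 (n:Int) 1).map g).sum = ∑ k ∈ Finset.range n, g (k:Int) := by
  rw [PySem.List.pyRange_one]
  have h1 : ((n:Int) - 0).toNat = n := by omega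
  rw [h1, List.map_map]
  rw [show (g ∘ fun k : Nat => (0:Int) + (k:Int)) = fun k : Nat => g (k:Int) by funext k; simp]
  rfl

lemma pvTermA_big (image : List (List Int)) (h w : Int) (i j : Nat)
    (hj : (image.getD i []).length ≤ j) : pvTermA image h w (i:Int) (j:Int) = 0 := by
  have : pvAt image (i:Int) (j:Int) = 0 := by
    apply pvAt_big image _ _ (by positivity)
    simp only [pvLenI]
    simp [List.getD_eq_getElem?_getD] at hj ⊢
    omega
  simp [pvTermA, this]

theorem calcVertexes_eq_sum2 (image : List (List Int)) :
    calcVertexes image =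
      ∑ i ∈ Finset.range image.length, ∑ j ∈ Finset.range (pvW image),
        pvTermA image (image.length : Int) (pvLenI image i) i j := by
  simp only [calcVertexes, PySem.List.len_eq, pvCellA_eq, PySem.List.foldl_add, zero_add]
  rw [pvRangeZeroSum]
  apply Finset.sum_congr rfl
  intro i hi
  simp only [Finset.mem_range] at hi
  rw [pvRangeZeroSum]
  apply sumExtend
  · have := pvW_ge image i
    simp [List.getD_eq_getElem?_getD] at this ⊢
    omega
  · intro j hj
    apply pvTermA_big
    simp [List.getD_eq_getElem?_getD]
    simp [List.getD_eq_getElem?_getD] at hj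
    omega

lemma pvListMapSum {α : Type} (l : List α) (F : α → Int) (d : α) :
    (l.map F).sum = ∑ i ∈ Finset.range l.length, F (l.getD i d) := by
  induction l with
  | nil => simp
  | cons x xs ih =>
    rw [List.map_cons, List.sum_cons, ih, List.length_cons, Finset.sum_range_succ']
    simp [add_comm]

lemma pvInd_big (image : List (List Int)) (i j : Nat)
    (hj : (image.getD i []).length ≤ j) : pvInd image (i:Int) (j:Int) = 0 := by
  have : pvAt image (i:Int) (j:Int) = 0 := by
    apply pvAt_big image _ _ (by positivity)
    simp only [pvLenI]
    simp [List.getD_eq_getElem?_getD] at hj ⊢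
    omega
  simp [pvInd, this]

-- B's filled count equals the indicator double sum A's characterization uses
lemma pvFilledB (image : List (List Int)) :
    (image.map (fun row => ((PySem.List.count row 1 : Nat) : Int))).sum
      = ∑ i ∈ Finset.range image.length, ∑ j ∈ Finset.range (pvW image), pvInd image i j := by
  have hrow : ∀ (row : List Int), ((PySem.List.count row 1 : Nat) : Int)
      = (row.map (fun v => if v = 1 then (1:Int) else 0)).sum := by
    intro row
    rw [PySem.List.count_eq, List.count_eq_countP]
    rw [show (fun v : Int => if v = 1 then (1:Int) else 0)
          = fun v : Int => if (v == 1) = true then (1:Int) else 0 by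
        funext v; simp]
    rw [PySem.List.sum_map_ite_one_zero]
  rw [show (fun (row : List Int) => ((PySem.List.count row 1 : Nat) : Int))
        = fun row => (row.map (fun v => if v = 1 then (1:Int) else 0)).sum by
      funext row; rw [hrow row]]
  rw [pvListMapSum image _ []]
  apply Finset.sum_congr rfl
  intro i hi
  simp only [Finset.mem_range] at hi
  rw [pvListMapSum _ _ 0]
  have hstep : ∀ j ∈ Finset.range (image.getD i []).length,
      (fun v : Int => if v = 1 then (1:Int) else 0) ((image.getD i []).getD j 0) = pvInd image i j := by
    intro j hj
    simp [pvInd, pvAt]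
  rw [Finset.sum_congr rfl hstep]
  apply sumExtend
  · exact pvW_ge image i
  · intro j hj
    exact pvInd_big image i j hj

-- the amount B subtracts at corner (p, q)
def pvSubB (image : List (List Int)) (p q : Int) : Int :=
  let k : Int := (if pvIsFilled image (p-1) (q-1) then 1 else 0)
               + (if pvIsFilled image (p-1) q then 1 else 0)
               + (if pvIsFilled image p (q-1) then 1 else 0)
               + (if pvIsFilled image p q then 1 else 0)
  if 2 ≤ k then k else 0

lemma pvCornerB_eq (image : List (List Int)) (p : Int) :
    pvCornerB image p = fun total q => total + (-(pvSubB image p q)) := by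
  funext t q
  simp only [pvCornerB, pvSubB]
  split_ifs <;> ring

lemma pvIsFilled_ind (image : List (List Int)) (r s : Int) (hs : 0 ≤ s) :
    (if pvIsFilled image r s then (1:Int) else 0) = pvInd image r s := by
  have hiff : pvIsFilled image r s = true ↔ (s < pvLenI image r ∧ pvAt image r s = 1) := by
    simp [pvIsFilled, pvLenI, pvAt, PySem.List.len_eq, hs]
  rw [← pvIndGuard image r s hs]
  by_cases h : s < pvLenI image r ∧ pvAt image r s = 1
  · rw [if_pos h, if_pos (hiff.mpr h)]
  · rw [if_neg h, if_neg (fun hb => h (hiff.mp hb))]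

-- the max-of-row-lengths computed by B's port equals pvW
lemma pvMaxAcc (l : List (List Int)) (m : Nat) :
    PySem.List.max? (((m : Nat) : Int) :: l.map (fun row => ((row.length : Nat) : Int))) id
      = some (((l.map List.length).foldl max m : Nat) : Int) := by
  induction l generalizing m with
  | nil => simp [PySem.List.max?]
  | cons r t ih =>
    simp only [List.map_cons, List.foldl_cons]
    by_cases h : ((m:Nat):Int) < ((r.length : Nat) : Int)
    · have hstep : PySem.List.max? (((m:Nat):Int) :: ((r.length:Nat):Int) :: t.map (fun row => ((row.length:Nat):Int))) id
          = PySem.List.max? (((r.length:Nat):Int) :: t.map (fun row => ((row.length:Nat):Int))) id := by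
        simp [PySem.List.max?, h]
      rw [hstep, ih r.length]
      have hmx : max m r.length = r.length := by omega
      rw [hmx]
    · have hstep : PySem.List.max? (((m:Nat):Int) :: ((r.length:Nat):Int) :: t.map (fun row => ((row.length:Nat):Int))) id
          = PySem.List.max? (((m:Nat):Int) :: t.map (fun row => ((row.length:Nat):Int))) id := by
        simp [PySem.List.max?, h]
      rw [hstep, ih m]
      have hmx : max m r.length = m := by omega
      rw [hmx]

lemma pvMaxW_eq (image : List (List Int)) :
    ((PySem.List.max? (image.map (fun row => ((row.length : Nat) : Int))) id).getD 0 : Int)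
      = ((pvW image : Nat) : Int) := by
  cases image with
  | nil => simp [PySem.List.max?, pvW]
  | cons r t =>
    rw [List.map_cons, pvMaxAcc t r.length]
    simp only [Option.getD_some, pvW, List.map_cons, List.foldl_cons]
    norm_num

-- B as the closed form over the same index ranges as A's characterization
theorem calcVertexes_alt_eq_sum (image : List (List Int)) :
    calcVertexes_alt image =
      4 * (∑ i ∈ Finset.range image.length, ∑ j ∈ Finset.range (pvW image), pvInd image i j)
      - ∑ i ∈ Finset.range (image.length - 1), ∑ j ∈ Finset.range (pvW image - 1),
          pvSubB image (i+1) (j+1) := by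
  simp only [calcVertexes_alt, PySem.List.len_eq, pvCornerB_eq, PySem.List.foldl_add, zero_add]
  rw [pvMaxW_eq, pvFilledB, pvRangeOneSum]
  have hin : ∀ i ∈ Finset.range (image.length - 1),
      ((PySem.List.pyRange 1 ((pvW image : Nat) : Int) 1).map
          (fun q => -(pvSubB image (1+(i:Int)) q))).sum
      = -(∑ j ∈ Finset.range (pvW image - 1), pvSubB image ((i:Int)+1) ((j:Int)+1)) := by
    intro i _
    rw [pvRangeOneSum, ← Finset.sum_neg_distrib]
    apply Finset.sum_congr rfl
    intro j _
    rw [add_comm 1 (i:Int), add_comm 1 (j:Int)]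
  rw [Finset.sum_congr rfl hin, Finset.sum_neg_distrib]
  ring

lemma pvInd01 (image : List (List Int)) (i j : Int) :
    pvInd image i j = 0 ∨ pvInd image i j = 1 := by
  unfold pvInd; split_ifs <;> simp

lemma pvLenI_natCast (image : List (List Int)) (r : Nat) :
    pvLenI image (r:Int) = ((image.getD r []).length : Int) := by
  simp [pvLenI, PySem.List.pyGetD_natCast, List.getD_eq_getElem?_getD]

-- pvCnt is the Nat version of pvInd
lemma pvCnt_eq_ind (image : List (List Int)) (r c : Nat) :
    ((pvCnt image r c : Nat) : Int) = pvInd image (r:Int) (c:Int) := by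
  rw [← pvIndGuard image (r:Int) (c:Int) (by positivity)]
  unfold pvCnt
  have hat : pvAt image (r:Int) (c:Int) = (image.getD r []).getD c 0 := by
    simp [pvAt, PySem.List.pyGetD_natCast, List.getD_eq_getElem?_getD]
  rw [hat, pvLenI_natCast]
  by_cases h : c < (image.getD r []).length ∧ (image.getD r []).getD c 0 = 1
  · rw [if_pos h, if_pos ⟨by exact_mod_cast h.1, h.2⟩]; norm_num
  · rw [if_neg h, if_neg (fun hh => h ⟨by exact_mod_cast hh.1, hh.2⟩)]; norm_num

-- both per-corner amounts in pvInd form (a..d are the four touching cells' indicators)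
lemma pvSub_form (image : List (List Int)) (i j : Nat) :
    pvSub image ((i:Int)+1) ((j:Int)+1)
      = (if 2 ≤ pvInd image i j + pvInd image i ((j:Int)+1) + pvInd image ((i:Int)+1) j + pvInd image ((i:Int)+1) ((j:Int)+1) then
          (if (j:Int)+1 < pvLenI image i then pvInd image i j else 0)
          + pvInd image i ((j:Int)+1)
          + (if (j:Int)+1 < pvLenI image ((i:Int)+1) then pvInd image ((i:Int)+1) j else 0)
          + pvInd image ((i:Int)+1) ((j:Int)+1)
        else 0) := by
  simp only [pvSub, add_sub_cancel_right,
    pvIndGuard image ((i:Int)) ((j:Int)) (by positivity),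
    pvIndGuard image ((i:Int)) ((j:Int)+1) (by positivity),
    pvIndGuard image ((i:Int)+1) ((j:Int)) (by positivity),
    pvIndGuard image ((i:Int)+1) ((j:Int)+1) (by positivity)]

lemma pvSubB_form (image : List (List Int)) (i j : Nat) :
    pvSubB image ((i:Int)+1) ((j:Int)+1)
      = (if 2 ≤ pvInd image i j + pvInd image i ((j:Int)+1) + pvInd image ((i:Int)+1) j + pvInd image ((i:Int)+1) ((j:Int)+1) then
          pvInd image i j + pvInd image i ((j:Int)+1) + pvInd image ((i:Int)+1) j + pvInd image ((i:Int)+1) ((j:Int)+1)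
        else 0) := by
  simp only [pvSubB, add_sub_cancel_right,
    pvIsFilled_ind image ((i:Int)) ((j:Int)) (by positivity),
    pvIsFilled_ind image ((i:Int)) ((j:Int)+1) (by positivity),
    pvIsFilled_ind image ((i:Int)+1) ((j:Int)) (by positivity),
    pvIsFilled_ind image ((i:Int)+1) ((j:Int)+1) (by positivity)]

lemma pvSub_le_pvSubB (image : List (List Int)) (i j : Nat) :
    pvSub image ((i:Int)+1) ((j:Int)+1) ≤ pvSubB image ((i:Int)+1) ((j:Int)+1) := by
  rw [pvSub_form, pvSubB_form]
  have b1 := pvInd01 image i j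
  have b2 := pvInd01 image i ((j:Int)+1)
  have b3 := pvInd01 image ((i:Int)+1) j
  have b4 := pvInd01 image ((i:Int)+1) ((j:Int)+1)
  rcases b1 with h1|h1 <;> rcases b2 with h2|h2 <;> rcases b3 with h3|h3 <;> rcases b4 with h4|h4 <;>
    rw [h1, h2, h3, h4] <;> split_ifs <;> omega

-- the Nat corner count of D_ equals the Int indicator sum
lemma pvK_cast (image : List (List Int)) (i j : Nat) :
    ((pvCnt image i j + pvCnt image i (j+1) + pvCnt image (i+1) j + pvCnt image (i+1) (j+1) : Nat) : Int)
      = pvInd image i j + pvInd image i ((j:Int)+1) + pvInd image ((i:Int)+1) j + pvInd image ((i:Int)+1) ((j:Int)+1) := by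
  have c1 := pvCnt_eq_ind image i j
  have c2 := pvCnt_eq_ind image i (j+1)
  have c3 := pvCnt_eq_ind image (i+1) j
  have c4 := pvCnt_eq_ind image (i+1) (j+1)
  push_cast at c1 c2 c3 c4 ⊢
  rw [c1, c2, c3, c4]

-- a filled cell ending its row: its indicator is 1 and A's diagonal guard fails there
lemma pvRag_fact (image : List (List Int)) (r c : Nat)
    (hL : (image.getD r []).length = c + 1) (hV : (image.getD r []).getD c 0 = 1) :
    pvInd image (r:Int) (c:Int) = 1 ∧ ¬ ((c:Int)+1 < pvLenI image (r:Int)) := by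
  constructor
  · rw [← pvCnt_eq_ind]
    unfold pvCnt
    rw [if_pos ⟨by omega, hV⟩]
    norm_num
  · rw [pvLenI_natCast, hL]
    push_cast
    omega

-- D_'s per-corner case implies (and is implied by) the count/row-end form the proofs use
lemma pvNew_to_old (image : List (List Int)) (i c : Nat)
    (h : ((image.getD i []).length = c+1 ∧ pvF image i c ∧ (pvF image (i+1) c ∨ pvF image (i+1) (c+1))) ∨
         ((image.getD (i+1) []).length = c+1 ∧ pvF image (i+1) c ∧ (pvF image i c ∨ pvF image i (c+1)))) :
    2 ≤ pvCnt image i c + pvCnt image i (c+1) + pvCnt image (i+1) c + pvCnt image (i+1) (c+1) ∧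
    (((image.getD i []).length = c+1 ∧ (image.getD i []).getD c 0 = 1) ∨
     ((image.getD (i+1) []).length = c+1 ∧ (image.getD (i+1) []).getD c 0 = 1)) := by
  have e : ∀ (r c' : Nat), pvF image r c' → pvCnt image r c' = 1 := by
    intro r c' h'
    unfold pvCnt; rw [if_pos h']
  rcases h with ⟨hL, hF, hO⟩ | ⟨hL, hF, hO⟩
  · refine ⟨?_, Or.inl ⟨hL, hF.2⟩⟩
    have h1 := e i c hF
    rcases hO with h' | h' <;> have h2 := e _ _ h' <;> omega
  · refine ⟨?_, Or.inr ⟨hL, hF.2⟩⟩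
    have h1 := e (i+1) c hF
    rcases hO with h' | h' <;> have h2 := e _ _ h' <;> omega

lemma pvOld_to_new (image : List (List Int)) (i c : Nat)
    (h2 : 2 ≤ pvCnt image i c + pvCnt image i (c+1) + pvCnt image (i+1) c + pvCnt image (i+1) (c+1))
    (hr : ((image.getD i []).length = c+1 ∧ (image.getD i []).getD c 0 = 1) ∨
          ((image.getD (i+1) []).length = c+1 ∧ (image.getD (i+1) []).getD c 0 = 1)) :
    ((image.getD i []).length = c+1 ∧ pvF image i c ∧ (pvF image (i+1) c ∨ pvF image (i+1) (c+1))) ∨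
    ((image.getD (i+1) []).length = c+1 ∧ pvF image (i+1) c ∧ (pvF image i c ∨ pvF image i (c+1))) := by
  have z : ∀ (r c' : Nat), ¬ pvF image r c' → pvCnt image r c' = 0 := by
    intro r c' h'
    unfold pvCnt; rw [if_neg h']
  have o : ∀ (r c' : Nat), pvCnt image r c' ≤ 1 := by
    intro r c'
    unfold pvCnt; split_ifs <;> omega
  rcases hr with ⟨hL, hV⟩ | ⟨hL, hV⟩
  · have hL' : (pvRow image i).length = c+1 := hL
    left
    refine ⟨hL, ⟨by omega, hV⟩, ?_⟩
    by_cases hA : pvF image (i+1) c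
    · exact Or.inl hA
    by_cases hB : pvF image (i+1) (c+1)
    · exact Or.inr hB
    exfalso
    have h0 : pvCnt image i (c+1) = 0 := z _ _ (fun hh => by have := hh.1; omega)
    have hz1 := z _ _ hA
    have hz2 := z _ _ hB
    have ho := o i c
    omega
  · have hL' : (pvRow image (i+1)).length = c+1 := hL
    right
    refine ⟨hL, ⟨by omega, hV⟩, ?_⟩
    by_cases hA : pvF image i c
    · exact Or.inl hA
    by_cases hB : pvF image i (c+1)
    · exact Or.inr hB
    exfalso
    have h0 : pvCnt image (i+1) (c+1) = 0 := z _ _ (fun hh => by have := hh.1; omega)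
    have hz1 := z _ _ hA
    have hz2 := z _ _ hB
    have ho := o (i+1) c
    omega

lemma pvFoldlMax_le (l : List Nat) (a L : Nat) (ha : a ≤ L) (h : ∀ x ∈ l, x ≤ L) :
    l.foldl max a ≤ L := by
  induction l generalizing a with
  | nil => simpa
  | cons x t ih =>
    exact ih (max a x) (by have := h x (by simp); omega) (fun y hy => h y (by simp [hy]))

lemma pvW_lt_of (image : List (List Int)) (L : Nat) (h : L < pvW image) :
    ∃ m < image.length, L < (image.getD m []).length := by
  by_contra hno
  push_neg at hno
  have : pvW image ≤ L := by
    apply pvFoldlMax_le _ _ _ (by omega)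
    intro x hx
    obtain ⟨row, hrow, rfl⟩ := List.mem_map.mp hx
    obtain ⟨k, hk, rfl⟩ := List.mem_iff_getElem.mp hrow
    have := hno k hk
    rwa [List.getD_eq_getElem _ _ hk] at this
  omega

-- packing and unpacking D_ into the per-corner count/row-end data the proofs use
lemma pvD_pack (image : List (List Int)) (i c : Nat)
    (hi : i < image.length - 1) (hc : c < pvW image - 1)
    (h2 : 2 ≤ pvCnt image i c + pvCnt image i (c+1) + pvCnt image (i+1) c + pvCnt image (i+1) (c+1))
    (hr : ((image.getD i []).length = c+1 ∧ (image.getD i []).getD c 0 = 1) ∨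
          ((image.getD (i+1) []).length = c+1 ∧ (image.getD (i+1) []).getD c 0 = 1)) :
    D_calcVertexes image := by
  obtain ⟨m, hm, hml⟩ : ∃ m < image.length, c+1 < (image.getD m []).length := by
    apply pvW_lt_of
    omega
  rcases pvOld_to_new image i c h2 hr with ⟨hL, hF, hO⟩ | ⟨hL, hF, hO⟩
  · refine ⟨i, by omega, i+1, by omega, Or.inl rfl, ?_, ⟨m, hm, ?_⟩, ?_⟩
    · have hLr : (pvRow image i).length = c+1 := hL
      rw [hLr]; simpa using hF
    · have hLr : (pvRow image i).length = c+1 := hL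
      rw [hLr]; exact hml
    · have hLr : (pvRow image i).length = c+1 := hL
      rw [hLr]; simpa using hO
  · refine ⟨i+1, by omega, i, by omega, Or.inr rfl, ?_, ⟨m, hm, ?_⟩, ?_⟩
    · have hLr : (pvRow image (i+1)).length = c+1 := hL
      rw [hLr]; simpa using hF
    · have hLr : (pvRow image (i+1)).length = c+1 := hL
      rw [hLr]; exact hml
    · have hLr : (pvRow image (i+1)).length = c+1 := hL
      rw [hLr]; simpa using hO

lemma pvD_unpack (image : List (List Int)) (h : D_calcVertexes image) :
    ∃ i c, i < image.length - 1 ∧ c < pvW image - 1 ∧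
      2 ≤ pvCnt image i c + pvCnt image i (c+1) + pvCnt image (i+1) c + pvCnt image (i+1) (c+1) ∧
      (((image.getD i []).length = c+1 ∧ (image.getD i []).getD c 0 = 1) ∨
       ((image.getD (i+1) []).length = c+1 ∧ (image.getD (i+1) []).getD c 0 = 1)) := by
  obtain ⟨r, hr, o, ho, hadj, hF, ⟨m, hm, hml⟩, hO⟩ := h
  have hpos : 0 < (pvRow image r).length := by
    rcases hF with ⟨h1, _⟩
    omega
  have hL : (pvRow image r).length = ((pvRow image r).length - 1) + 1 := by omega
  set c := (pvRow image r).length - 1 with hcdef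
  have hWc : c < pvW image - 1 := by
    have h1 := pvW_ge image m
    have h2 : (pvRow image m).length = (image.getD m []).length := rfl
    omega
  rw [hL] at hO hml
  rcases hadj with rfl | rfl
  · exact ⟨r, c, by omega, hWc, pvNew_to_old image r c (Or.inl ⟨hL, hF, hO⟩)⟩
  · exact ⟨o, c, by omega, hWc, pvNew_to_old image o c (Or.inr ⟨hL, hF, hO⟩)⟩

-- the corner condition of D_ is exactly where the two per-corner amounts differ
lemma pvCorner_diff (image : List (List Int)) (i j : Nat)
    (hcond : 2 ≤ pvCnt image i j + pvCnt image i (j+1) + pvCnt image (i+1) j + pvCnt image (i+1) (j+1))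
    (hrag : ((image.getD i []).length = j+1 ∧ (image.getD i []).getD j 0 = 1) ∨
            ((image.getD (i+1) []).length = j+1 ∧ (image.getD (i+1) []).getD j 0 = 1)) :
    pvSub image ((i:Int)+1) ((j:Int)+1) < pvSubB image ((i:Int)+1) ((j:Int)+1) := by
  rw [pvSub_form, pvSubB_form]
  have hk : (2:Int) ≤ pvInd image i j + pvInd image i ((j:Int)+1) + pvInd image ((i:Int)+1) j + pvInd image ((i:Int)+1) ((j:Int)+1) := by
    rw [← pvK_cast]; exact_mod_cast hcond
  rw [if_pos hk, if_pos hk]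
  have b1 := pvInd01 image i j
  have b2 := pvInd01 image i ((j:Int)+1)
  have b3 := pvInd01 image ((i:Int)+1) j
  have b4 := pvInd01 image ((i:Int)+1) ((j:Int)+1)
  rcases hrag with ⟨hL, hV⟩ | ⟨hL, hV⟩
  · obtain ⟨hA, hg⟩ := pvRag_fact image i j hL hV
    rw [if_neg hg, hA]
    split_ifs <;> omega
  · obtain ⟨hC, hg⟩ := pvRag_fact image (i+1) j (by simpa using hL) (by simpa using hV)
    push_cast at hC hg
    rw [if_neg hg, hC]
    split_ifs <;> omega

lemma pvCorner_same (image : List (List Int)) (i j : Nat)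
    (hno : ¬ (2 ≤ pvCnt image i j + pvCnt image i (j+1) + pvCnt image (i+1) j + pvCnt image (i+1) (j+1) ∧
      (((image.getD i []).length = j+1 ∧ (image.getD i []).getD j 0 = 1) ∨
       ((image.getD (i+1) []).length = j+1 ∧ (image.getD (i+1) []).getD j 0 = 1)))) :
    pvSub image ((i:Int)+1) ((j:Int)+1) = pvSubB image ((i:Int)+1) ((j:Int)+1) := by
  rw [pvSub_form, pvSubB_form]
  by_cases hk2 : 2 ≤ pvCnt image i j + pvCnt image i (j+1) + pvCnt image (i+1) j + pvCnt image (i+1) (j+1)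
  · have hk : (2:Int) ≤ pvInd image i j + pvInd image i ((j:Int)+1) + pvInd image ((i:Int)+1) j + pvInd image ((i:Int)+1) ((j:Int)+1) := by
      rw [← pvK_cast]; exact_mod_cast hk2
    rw [if_pos hk, if_pos hk]
    have hrag := fun hr => hno ⟨hk2, hr⟩
    -- top cell: either its indicator is 0, or the diagonal guard holds
    have htop : (if (j:Int)+1 < pvLenI image i then pvInd image (i:Int) (j:Int) else 0) = pvInd image (i:Int) (j:Int) := by
      rcases pvInd01 image i j with h0 | h1
      · rw [h0]; split_ifs <;> rfl
      · have hcell : j < (image.getD i []).length ∧ (image.getD i []).getD j 0 = 1 := by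
          by_contra hc
          have := pvCnt_eq_ind image i j
          unfold pvCnt at this
          rw [if_neg hc] at this
          rw [h1] at this
          norm_num at this
        have hlen : (image.getD i []).length ≠ j + 1 := fun he => hrag (Or.inl ⟨he, hcell.2⟩)
        rw [if_pos (by rw [pvLenI_natCast]; push_cast; omega)]
    have hbot : (if (j:Int)+1 < pvLenI image ((i:Int)+1) then pvInd image ((i:Int)+1) (j:Int) else 0) = pvInd image ((i:Int)+1) (j:Int) := by
      rcases pvInd01 image ((i:Int)+1) j with h0 | h1
      · rw [h0]; split_ifs <;> rfl
      · have h1' : pvInd image ((i+1 : Nat):Int) ((j:Nat):Int) = 1 := by exact_mod_cast h1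
        have hcell : j < (image.getD (i+1) []).length ∧ (image.getD (i+1) []).getD j 0 = 1 := by
          by_contra hc
          have := pvCnt_eq_ind image (i+1) j
          unfold pvCnt at this
          rw [if_neg hc] at this
          rw [h1'] at this
          norm_num at this
        have hlen : (image.getD (i+1) []).length ≠ j + 1 := fun he => hrag (Or.inr ⟨he, hcell.2⟩)
        rw [if_pos (by
          have := pvLenI_natCast image (i+1)
          push_cast at this
          rw [this]; omega)]
    rw [htop, hbot]
  · have hk : ¬ (2:Int) ≤ pvInd image i j + pvInd image i ((j:Int)+1) + pvInd image ((i:Int)+1) j + pvInd image ((i:Int)+1) ((j:Int)+1) := by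
      rw [← pvK_cast]; exact_mod_cast hk2
    rw [if_neg hk, if_neg hk]

-- ===== VERDICT (by name: the statement is the Claim_ definition above) =====
theorem calcVertexes_spec : Claim_unchanged_calcVertexes := by
  intro image _ _
  unfold Spec_calcVertexes
  intro hnd
  rw [calcVertexes_eq_sum2, sums_agree2, calcVertexes_alt_eq_sum]
  have hcong : ∀ i ∈ Finset.range (image.length - 1), ∀ j ∈ Finset.range (pvW image - 1),
      pvSub image ((i:Int)+1) ((j:Int)+1) = pvSubB image ((i:Int)+1) ((j:Int)+1) := by
    intro i hi j hj
    simp only [Finset.mem_range] at hi hj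
    apply pvCorner_same
    intro hcd
    exact hnd (pvD_pack image i j (by omega) (by omega) hcd.1 hcd.2)
  rw [Finset.sum_congr rfl (fun i hi => Finset.sum_congr rfl (hcong i hi))]

theorem calcVertexes_changed : Claim_changed_calcVertexes := by
  unfold Claim_changed_calcVertexes; decide

theorem calcVertexes_tight : Claim_exact_calcVertexes := by
  intro image _ _ hd
  obtain ⟨i, c, hi, hc, hk, hrag⟩ := pvD_unpack image hd
  have hAB : calcVertexes image - calcVertexes_alt image
      = ∑ x ∈ Finset.range (image.length - 1), ∑ y ∈ Finset.range (pvW image - 1),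
          (pvSubB image ((x:Int)+1) ((y:Int)+1) - pvSub image ((x:Int)+1) ((y:Int)+1)) := by
    rw [calcVertexes_eq_sum2, sums_agree2, calcVertexes_alt_eq_sum]
    simp only [Finset.sum_sub_distrib]
    ring
  have hterm : ∀ x ∈ Finset.range (image.length - 1), ∀ y ∈ Finset.range (pvW image - 1),
      0 ≤ pvSubB image ((x:Int)+1) ((y:Int)+1) - pvSub image ((x:Int)+1) ((y:Int)+1) := by
    intro x _ y _
    have := pvSub_le_pvSubB image x y
    omega
  have hpos : 0 < pvSubB image ((i:Int)+1) ((c:Int)+1) - pvSub image ((i:Int)+1) ((c:Int)+1) := by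
    have hd := pvCorner_diff image i c hk hrag
    omega
  have hne : (0:Int) < calcVertexes image - calcVertexes_alt image := by
    rw [hAB]
    apply Finset.sum_pos'
    · intro x hx
      exact Finset.sum_nonneg (fun y hy => hterm x hx y hy)
    · refine ⟨i, Finset.mem_range.mpr (by omega), ?_⟩
      apply Finset.sum_pos'
      · intro y hy
        exact hterm i (Finset.mem_range.mpr (by omega)) y hy
      · exact ⟨c, Finset.mem_range.mpr (by omega), hpos⟩
  omega
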